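-- pv_equiv track=rewrite | github.com/jzqin/mit_algorithms_practice | ps0-template/count_long_subarray.py | count_long_subarray
-- ===== SOURCE A (Python) =====
-- def count_long_subarray(A):
--     '''
--     Input:  A     | Python Tuple of positive integers
--     Output: count | number of longest increasing subarrays of A
--     '''
--     count = 0
--     ##################
--     max_substr_len = 0
--     substr_len = 0
--     for i in range(len(A)-1):
--         if A[i+1] > A[i]:
--             substr_len += 1
--             if substr_len > max_substr_len:
--                 max_substr_len = substr_len
--         else:
--             substr_len = 0
--
--     substr_len = 0
--     for i in range(len(A)-1):
--         if A[i+1] > A[i]: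
--             substr_len += 1
--             if substr_len == max_substr_len:
--                 count +=1
--         else:
--             substr_len = 0
--
--     ##################
--     return count
-- ===== SOURCE B (Python) =====
-- def count_long_subarray(A):
--     '''
--     Input:  A     | Python Tuple of positive integers
--     Output: count | number of longest increasing subarrays of A
--     '''
--     runs = []
--     cur = 0
--     for x, y in zip(A, A[1:]):
--         if y > x:
--             cur += 1
--         else:
--             if cur > 0:
--                 runs.append(cur)
--             cur = 0
--     if cur > 0:
--         runs.append(cur)
--     if not runs:
--         return 0
--     m = max(runs)
--     return runs.count(m)
-- ===== Notes on version B (the rewrite author's own statement) =====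
-- stated objective: simpler
-- what changed: Replaces A's two sequential re-scans of the array (one to find the maximal ascent-run length, one to count runs reaching it) with a single pass that collects the explicit list of ascent-run lengths, then returns runs.count(max(runs)) (0 if there are no runs).
import Mathlib
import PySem

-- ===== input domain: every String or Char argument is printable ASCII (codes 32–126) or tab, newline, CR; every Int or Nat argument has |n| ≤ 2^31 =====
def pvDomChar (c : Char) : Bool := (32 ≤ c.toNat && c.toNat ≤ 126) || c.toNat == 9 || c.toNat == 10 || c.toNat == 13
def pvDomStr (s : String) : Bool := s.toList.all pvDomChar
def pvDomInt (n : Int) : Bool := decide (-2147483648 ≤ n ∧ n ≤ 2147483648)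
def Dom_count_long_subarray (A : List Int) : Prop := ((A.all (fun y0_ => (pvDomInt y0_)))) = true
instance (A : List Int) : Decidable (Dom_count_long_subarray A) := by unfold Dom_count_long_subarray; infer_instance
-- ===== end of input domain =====

-- B replaces A's two full re-scans with one pass that collects explicit run lengths, then aggregates (max + count) over that list; objective: simpler.


-- ===== PORT A =====
-- literal port: two for-loops over range(len(A)-1); A[i]/A[i+1] are always in range, read via pyGetD
def aLoop1 (A : List Int) : Int × Int :=
  (PySem.List.pyRange 0 (PySem.List.len A - 1) 1).foldl
    (fun (s : Int × Int) i =>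
      if PySem.List.pyGetD A (i+1) 0 > PySem.List.pyGetD A i 0 then
        (if s.2 + 1 > s.1 then s.2 + 1 else s.1, s.2 + 1)
      else (s.1, 0)) (0, 0)

def aLoop2 (A : List Int) (M : Int) : Int × Int :=
  (PySem.List.pyRange 0 (PySem.List.len A - 1) 1).foldl
    (fun (s : Int × Int) i =>
      if PySem.List.pyGetD A (i+1) 0 > PySem.List.pyGetD A i 0 then
        (if s.2 + 1 == M then s.1 + 1 else s.1, s.2 + 1)
      else (s.1, 0)) (0, 0)

def count_long_subarray (A : List Int) : Int := (aLoop2 A (aLoop1 A).1).1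

-- ===== PORT B =====
-- literal port of Source B: zip(A, A[1:]) fold building (runs, cur), trailing append, then max/count
def bFold (A : List Int) : List Int × Int :=
  (A.zip (A.drop 1)).foldl
    (fun (s : List Int × Int) p =>
      if p.2 > p.1 then (s.1, s.2 + 1)
      else (if s.2 > 0 then s.1 ++ [s.2] else s.1, 0)) ([], 0)

def bRuns (A : List Int) : List Int :=
  if (bFold A).2 > 0 then (bFold A).1 ++ [(bFold A).2] else (bFold A).1

def count_long_subarray_alt (A : List Int) : Int :=
  match PySem.List.max? (bRuns A) (fun y => y) with
  | none => 0
  | some m => ((bRuns A).count m : Int)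

-- ===== PRECONDITION & SPEC =====
def Spec_count_long_subarray (A : List Int) (out : Int) : Prop := out = count_long_subarray_alt A
instance (A : List Int) (out : Int) : Decidable (Spec_count_long_subarray A out) := by unfold Spec_count_long_subarray; infer_instance

-- ===== CLAIM (what is proved, stated in full; the proofs are below) =====
def Claim_equal_count_long_subarray : Prop := ∀ (A : List Int), Dom_count_long_subarray A → Spec_count_long_subarray A (count_long_subarray A)

-- ===== LEMMAS AND PROOFS =====

-- run lengths of the maximal ascent runs of a pair list, starting from current run length c
def runsR : List (Int × Int) → Int → List Int
  | [], c => if c > 0 then [c] else []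
  | p :: t, c => if p.2 > p.1 then runsR t (c + 1)
                 else (if c > 0 then [c] else []) ++ runsR t 0

def listMax (l : List Int) : Int := l.foldr max 0

-- recursion forms of A's two loops over the pair list
def loop1R : List (Int × Int) → Int → Int → Int
  | [], m, _ => m
  | p :: t, m, c => if p.2 > p.1 then loop1R t (if c + 1 > m then c + 1 else m) (c + 1)
                    else loop1R t m 0

def loop2R (M : Int) : List (Int × Int) → Int → Int → Int
  | [], cnt, _ => cnt
  | p :: t, cnt, c => if p.2 > p.1 then loop2R M t (if c + 1 == M then cnt + 1 else cnt) (c + 1)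
                      else loop2R M t cnt 0

theorem foldRangePairs {σ : Type} (g : σ → Int → Int → σ) (A : List Int) :
    ∀ (d a : Nat) (init : σ), A.length ≤ a + d + 1 →
    (PySem.List.pyRange (a : Int) (PySem.List.len A - 1) 1).foldl
      (fun s i => g s (PySem.List.pyGetD A i 0) (PySem.List.pyGetD A (i+1) 0)) init
    = ((A.drop a).zip (A.drop (a+1))).foldl (fun s p => g s p.1 p.2) init := by
  intro d
  induction d with
  | zero =>
    intro a init h
    rw [PySem.List.pyRange_one_eq_nil (by simp; omega)]
    rw [List.drop_eq_nil_of_le (by omega : A.length ≤ a + 1)]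
    simp
  | succ d ih =>
    intro a init h
    by_cases hlt : a + 1 < A.length
    · rw [PySem.List.pyRange_one_cons (by simp; omega)]
      simp only [List.foldl_cons]
      have ha : (a : Int) + 1 = ((a + 1 : Nat) : Int) := by push_cast; ring
      rw [ha, ih (a+1) _ (by omega)]
      rw [List.drop_eq_getElem_cons (by omega : a < A.length),
          List.drop_eq_getElem_cons (by omega : a + 1 < A.length)]
      simp only [List.zip_cons_cons, List.foldl_cons]
      have e1 : PySem.List.pyGetD A (a : Int) 0 = A[a] := by
        rw [PySem.List.pyGetD_natCast]; exact List.getD_eq_getElem _ _ (by omega)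
      have e2 : PySem.List.pyGetD A ((a + 1 : Nat) : Int) 0 = A[a+1] := by
        rw [PySem.List.pyGetD_natCast]; exact List.getD_eq_getElem _ _ (by omega)
      rw [e1, ← ha, ha, e2]
    · rw [PySem.List.pyRange_one_eq_nil (by simp; omega)]
      rw [List.drop_eq_nil_of_le (by omega : A.length ≤ a + 1)]
      simp

theorem foldRangePairs0 {σ : Type} (g : σ → Int → Int → σ) (A : List Int) (init : σ) :
    (PySem.List.pyRange 0 (PySem.List.len A - 1) 1).foldl
      (fun s i => g s (PySem.List.pyGetD A i 0) (PySem.List.pyGetD A (i+1) 0)) init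
    = (A.zip (A.drop 1)).foldl (fun s p => g s p.1 p.2) init := by
  have h := foldRangePairs g A A.length 0 init (by omega)
  simpa using h

theorem foldl1_eq_loop1R (p : List (Int × Int)) (m c : Int) :
    (p.foldl (fun (s : Int × Int) q =>
      if q.2 > q.1 then (if s.2 + 1 > s.1 then s.2 + 1 else s.1, s.2 + 1)
      else (s.1, 0)) (m, c)).1 = loop1R p m c := by
  induction p generalizing m c with
  | nil => simp [loop1R]
  | cons q t ih => simp only [List.foldl_cons, loop1R]; split_ifs <;> simp_all

theorem foldl2_eq_loop2R (M : Int) (p : List (Int × Int)) (cnt c : Int) :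
    (p.foldl (fun (s : Int × Int) q =>
      if q.2 > q.1 then (if s.2 + 1 == M then s.1 + 1 else s.1, s.2 + 1)
      else (s.1, 0)) (cnt, c)).1 = loop2R M p cnt c := by
  induction p generalizing cnt c with
  | nil => simp [loop2R]
  | cons q t ih => simp only [List.foldl_cons, loop2R]; split_ifs <;> simp_all

theorem bfold_eq_runsR (p : List (Int × Int)) : ∀ (rs : List Int) (c : Int),
    (let st := p.foldl
      (fun (s : List Int × Int) q =>
        if q.2 > q.1 then (s.1, s.2 + 1)
        else (if s.2 > 0 then s.1 ++ [s.2] else s.1, 0)) (rs, c)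
     if st.2 > 0 then st.1 ++ [st.2] else st.1) = rs ++ runsR p c := by
  induction p with
  | nil => intro rs c; by_cases h : 0 < c <;> simp [runsR, h]
  | cons q t ih =>
    intro rs c
    simp only [List.foldl_cons, runsR]
    by_cases h1 : q.1 < q.2
    · simp only [gt_iff_lt, if_pos h1]
      exact ih rs (c + 1)
    · simp only [gt_iff_lt, if_neg h1]
      by_cases h2 : 0 < c
      · simp only [if_pos h2]
        rw [ih (rs ++ [c]) 0, List.append_assoc]
      · simp only [if_neg h2, List.nil_append]
        exact ih rs 0

theorem runsR_pos (p : List (Int × Int)) : ∀ (c : Int), 0 ≤ c →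
    ∀ r ∈ runsR p c, 1 ≤ r := by
  induction p with
  | nil =>
    intro c hc r hr
    unfold runsR at hr
    by_cases h : c > 0
    · simp [h] at hr; omega
    · simp [h] at hr
  | cons q t ih =>
    intro c hc r hr
    unfold runsR at hr
    by_cases h1 : q.2 > q.1
    · simp only [if_pos h1] at hr
      exact ih (c+1) (by omega) r hr
    · simp only [if_neg h1] at hr
      by_cases h2 : c > 0
      · simp [h2] at hr
        rcases hr with rfl | hr
        · omega
        · exact ih 0 le_rfl r hr
      · simp [h2] at hr
        exact ih 0 le_rfl r hr

theorem runsR_ge (p : List (Int × Int)) (c : Int) (hc : 0 < c) :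
    ∃ r ∈ runsR p c, c ≤ r := by
  induction p generalizing c with
  | nil => exact ⟨c, by simp [runsR, hc], le_refl c⟩
  | cons q t ih =>
    unfold runsR; split_ifs with h1
    · obtain ⟨r, hr, hcr⟩ := ih (c+1) (by omega); exact ⟨r, hr, by omega⟩
    · exact ⟨c, by simp, le_refl c⟩

theorem le_listMax (l : List Int) (r : Int) (hr : r ∈ l) : r ≤ listMax l := by
  induction l with
  | nil => simp at hr
  | cons a t ih =>
    simp [listMax] at *
    rcases hr with rfl | hr
    · left; rfl
    · right; exact ih hr

theorem loop1R_eq (p : List (Int × Int)) : ∀ (m c : Int), 0 ≤ c → c ≤ m →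
    loop1R p m c = max m (listMax (runsR p c)) := by
  induction p with
  | nil =>
    intro m c h0 hcm
    unfold loop1R runsR
    by_cases h : c > 0 <;> simp [h, listMax] <;> omega
  | cons q t ih =>
    intro m c h0 hcm
    unfold loop1R runsR
    by_cases h1 : q.2 > q.1
    · simp only [if_pos h1]
      rw [ih (if c + 1 > m then c + 1 else m) (c+1) (by omega) (by split_ifs <;> omega)]
      obtain ⟨r, hr, hcr⟩ := runsR_ge t (c+1) (by omega)
      have hle : c + 1 ≤ listMax (runsR t (c+1)) := le_trans hcr (le_listMax _ _ hr)
      split_ifs with h2 <;> omega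
    · simp only [if_neg h1]
      rw [ih m 0 le_rfl (by omega)]
      by_cases h2 : c > 0
      · simp only [if_pos h2]
        have : listMax (c :: runsR t 0) = max c (listMax (runsR t 0)) := by simp [listMax]
        simp only [List.singleton_append, this]
        omega
      · simp only [if_neg h2, List.nil_append]

theorem listMax_nonneg (l : List Int) : 0 ≤ listMax l := by
  induction l with
  | nil => simp [listMax]
  | cons a t ih => simp [listMax] at *; omega

theorem loop2R_zeroM (p : List (Int × Int)) : ∀ (cnt c : Int), 0 ≤ c →
    loop2R 0 p cnt c = cnt := by
  induction p with
  | nil => intro cnt c _; rfl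
  | cons q t ih =>
    intro cnt c hc
    unfold loop2R
    have hne : (c + 1 == (0:Int)) = false := by simp; omega
    by_cases h1 : q.2 > q.1
    · simp only [if_pos h1, hne, Bool.false_eq_true, if_false]
      exact ih (cnt) (c+1) (by omega)
    · simp only [if_neg h1]
      exact ih cnt 0 le_rfl

theorem loop2R_eq (M : Int) (hM : 1 ≤ M) (p : List (Int × Int)) :
    ∀ (cnt c : Int), 0 ≤ c → (∀ r ∈ runsR p c, r ≤ M) →
    loop2R M p cnt c = cnt + ((runsR p c).count M : Int) - (if c = M then 1 else 0) := by
  induction p with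
  | nil =>
    intro cnt c h0 hb
    unfold loop2R runsR
    by_cases hc : 0 < c
    · simp only [if_pos hc]
      by_cases hcm : c = M
      · subst hcm; simp
      · simp [hcm]
    · simp only [if_neg hc]
      have hcm : ¬ (c = M) := by omega
      simp [hcm]
  | cons q t ih =>
    intro cnt c h0 hb
    unfold loop2R
    unfold runsR at hb ⊢
    by_cases h1 : q.2 > q.1
    · simp only [if_pos h1] at hb ⊢
      have hcM : ¬ (c = M) := by
        intro hEq
        obtain ⟨r, hr, hcr⟩ := runsR_ge t (c+1) (by omega)
        have := hb r hr; omega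
      rw [ih _ (c+1) (by omega) hb]
      by_cases h2 : c + 1 = M
      · have hbeq : (c + 1 == M) = true := by simp [h2]
        simp only [hbeq, if_true, if_pos h2, if_neg hcM]
        omega
      · have hbeq : (c + 1 == M) = false := by simp [h2]
        simp only [hbeq, Bool.false_eq_true, if_false, if_neg h2, if_neg hcM]
    · simp only [if_neg h1] at hb ⊢
      rw [ih cnt 0 le_rfl (fun r hr => hb r (by simp [hr]))]
      have h0M : ¬ ((0:Int) = M) := by omega
      simp only [h0M, if_false]
      by_cases hc : 0 < c
      · simp only [if_pos hc, List.count_append, List.count_cons, List.count_nil]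
        by_cases hcm : c = M
        · subst hcm; simp; omega
        · simp [hcm]
      · simp only [if_neg hc, List.nil_append]
        have hcm : ¬ (c = M) := by omega
        simp [hcm]

theorem foldl_max_eq (t : List Int) : ∀ (x : Int), 0 ≤ x → (∀ y ∈ t, 0 ≤ y) →
    t.foldl max x = max x (listMax t) := by
  induction t with
  | nil => intro x hx _; simp [listMax]; omega
  | cons a t' ih =>
    intro x hx ht
    simp only [List.foldl_cons, listMax, List.foldr_cons]
    rw [ih (max x a) (by have := ht a (by simp); omega) (fun y hy => ht y (by simp [hy]))]
    simp only [listMax]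
    omega

-- ===== VERDICT (by name: the statement is the Claim_ definition above) =====
theorem count_long_subarray_spec : Claim_equal_count_long_subarray := by
  intro A _
  unfold Spec_count_long_subarray
  have h2 : (aLoop1 A).1 = loop1R (A.zip (A.drop 1)) 0 0 := by
    unfold aLoop1
    rw [foldRangePairs0 (fun s v w => if w > v then
          ((if s.2 + 1 > s.1 then s.2 + 1 else s.1 : Int), (s.2 + 1 : Int)) else (s.1, 0))
        A ((0:Int), (0:Int)), foldl1_eq_loop1R]
  have h1 : count_long_subarray A = loop2R ((aLoop1 A).1) (A.zip (A.drop 1)) 0 0 := by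
    unfold count_long_subarray aLoop2
    rw [foldRangePairs0 (fun s v w => if w > v then
          ((if s.2 + 1 == (aLoop1 A).1 then s.1 + 1 else s.1 : Int), (s.2 + 1 : Int)) else (s.1, 0))
        A ((0:Int), (0:Int)), foldl2_eq_loop2R]
  have h3 : bRuns A = runsR (A.zip (A.drop 1)) 0 := by
    unfold bRuns bFold
    have h := bfold_eq_runsR (A.zip (A.drop 1)) [] 0
    simpa using h
  set P := A.zip (A.drop 1) with hP
  unfold count_long_subarray_alt
  rw [h1, h2, h3]
  have hM : loop1R P 0 0 = listMax (runsR P 0) := by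
    rw [loop1R_eq P 0 0 le_rfl le_rfl]
    have := listMax_nonneg (runsR P 0); omega
  rw [hM]
  cases hR : runsR P 0 with
  | nil =>
    have hl0 : listMax ([] : List Int) = 0 := rfl
    rw [hl0, loop2R_zeroM P 0 0 le_rfl]
    simp [PySem.List.max?]
  | cons r t =>
    have hpos : ∀ x ∈ runsR P 0, 1 ≤ x := runsR_pos P 0 le_rfl
    have hr1 : 1 ≤ r := hpos r (by rw [hR]; simp)
    have hMax1 : 1 ≤ listMax (r :: t) := le_trans hr1 (le_listMax _ _ (by simp))
    have hb : ∀ x ∈ runsR P 0, x ≤ listMax (r :: t) := fun x hx => hR ▸ le_listMax _ _ (hR ▸ hx)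
    rw [loop2R_eq (listMax (r :: t)) hMax1 P 0 0 le_rfl hb, hR]
    have h0M : ¬ ((0:Int) = listMax (r :: t)) := by omega
    rw [PySem.List.max?_id_cons]
    have hfm : t.foldl max r = listMax (r :: t) := by
      have h := foldl_max_eq t r (by omega)
        (fun y hy => le_trans (by norm_num) (hpos y (by rw [hR]; simp [hy])))
      simp only [listMax, List.foldr_cons] at h ⊢
      omega
    rw [hfm]
    simp [h0M]
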